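-- pv_equiv track=rewrite | github.com/autumn-gao/entitlement-ci | testcases/virt_who/virtwhobase.py | __parse_avail_pools
-- ===== SOURCE A (Python) =====
-- def __parse_avail_pools(output):
--     datalines = output.splitlines()
--     pool_list = []
--     data_segs = []
--     segs = []
--     for line in datalines:
--         if ("Product Name:" in line) or ("ProductName:" in line) or ("Subscription Name:" in line):
--             segs.append(line)
--         elif segs:
--             # change this section for more than 1 lines without ":" exist
--             if ":" in line:
--                 segs.append(line)
--             else:
--                 segs[-1] = segs[-1] + " " + line.strip()
--         if ("Machine Type:" in line) or ("MachineType:" in line) or ("System Type:" in line):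
--             data_segs.append(segs)
--             segs = []
--     # parse detail information for each pool
--     for seg in data_segs:
--         pool_dict = {}
--         for item in seg:
--             keyitem = item.split(":")[0].replace(" ", "")
--             valueitem = item.split(":")[1].strip()
--             pool_dict[keyitem] = valueitem
--         pool_list.append(pool_dict)
--     return pool_list
-- ===== SOURCE B (Python) =====
-- def __parse_avail_pools(output):
--     # single pass: keep a dict of raw item lines keyed by parsed key, emit on each closing line
--     pools = []
--     current = {}          # key -> raw accumulated item text (header/":"-line plus continuations)
--     last_key = None
--     active = False
--     for line in output.splitlines():
--         header = ("Product Name:" in line) or ("ProductName:" in line) or ("Subscription Name:" in line)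
--         if header or (active and ":" in line):
--             last_key = line.split(":")[0].replace(" ", "")
--             current[last_key] = line
--             active = True
--         elif active:
--             current[last_key] = current[last_key] + " " + line.strip()
--         if ("Machine Type:" in line) or ("MachineType:" in line) or ("System Type:" in line):
--             pools.append({k: v.split(":")[1].strip() for k, v in current.items()})
--             current = {}
--             last_key = None
--             active = False
--     return pools
-- ===== Notes on version B (the rewrite author's own statement) =====
-- stated objective: simpler
-- what changed: Replaced the two-phase design (collect line segments into lists, then a second loop re-splitting every segment into a dict) by a single pass that maintains one dict of raw item lines keyed by the parsed key plus a last_key/active state, emitting and parsing each pool dict directly at its closing line.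
import Mathlib
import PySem

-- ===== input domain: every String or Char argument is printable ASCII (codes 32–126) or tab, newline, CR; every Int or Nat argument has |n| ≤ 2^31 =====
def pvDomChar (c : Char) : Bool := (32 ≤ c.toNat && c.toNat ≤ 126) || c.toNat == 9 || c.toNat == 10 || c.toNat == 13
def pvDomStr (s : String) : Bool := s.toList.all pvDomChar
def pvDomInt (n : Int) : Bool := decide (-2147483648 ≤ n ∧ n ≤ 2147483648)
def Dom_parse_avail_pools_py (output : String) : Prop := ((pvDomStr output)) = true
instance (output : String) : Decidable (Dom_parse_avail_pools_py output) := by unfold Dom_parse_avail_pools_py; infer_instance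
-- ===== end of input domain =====

-- B replaces A's two-phase design (collect segment lists, then re-split each segment into a
-- dict) by one pass keeping a dict of raw item lines; objective: simpler (one loop, one state).

-- ===== PORT A =====
-- shared text tests and the key/value parsing expressions both Python versions spell identically
def pvIsHeader (line : String) : Bool :=
  PySem.Str.isIn "Product Name:" line || PySem.Str.isIn "ProductName:" line ||
    PySem.Str.isIn "Subscription Name:" line

def pvIsClose (line : String) : Bool :=
  PySem.Str.isIn "Machine Type:" line || PySem.Str.isIn "MachineType:" line ||
    PySem.Str.isIn "System Type:" line

-- item.split(":")  (sep is nonempty, so Python's split never raises: .getD [] is never used)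
def pvSplitColon (s : String) : List String := (PySem.Str.split? s ":").getD []

-- item.split(":")[0].replace(" ", "")   (split always returns a nonempty list: index 0 in range)
def pvKeyOf (item : String) : String :=
  PySem.Str.replace (PySem.List.pyGetD (pvSplitColon item) 0 "") " " ""

-- item.split(":")[1].strip()   (every parsed item contains ':', so index 1 is in range)
def pvValOf (item : String) : String :=
  PySem.Str.strip (PySem.List.pyGetD (pvSplitColon item) 1 "")

-- one iteration of A's first loop; state = (data_segs, segs)
def pvStep1 (st : List (List String) × List String) (line : String) :
    List (List String) × List String :=
  let segs :=
    if pvIsHeader line then st.2 ++ [line]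
    else if st.2 ≠ [] then
      if PySem.Str.isIn ":" line then st.2 ++ [line]
      else st.2.dropLast ++ [PySem.List.pyGetD st.2 (-1) "" ++ " " ++ PySem.Str.strip line]
    else st.2
  if pvIsClose line then (st.1 ++ [segs], []) else (st.1, segs)

-- A's second loop body: build pool_dict from one segment
def pvPoolDict (seg : List String) : List (String × String) :=
  (seg.foldl (fun d item => d.insert (pvKeyOf item) (pvValOf item))
    (PySem.Dict.empty : PySem.Dict String String)).items

def parse_avail_pools_py (output : String) : List (List (String × String)) :=
  (((PySem.Str.splitlines output).foldl pvStep1 ([], [])).1).map pvPoolDict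

-- ===== PORT B =====
-- one iteration of B's single loop; state = (pools, current, last_key, active)
-- the dict comprehension {k: v.split(":")[1].strip() for k, v in current.items()} is ported as
-- items.map (keys of current are already unique, so re-inserting them is plain mapping)
def pvStepB (st : List (List (String × String)) × PySem.Dict String String × String × Bool)
    (line : String) : List (List (String × String)) × PySem.Dict String String × String × Bool :=
  let s1 :=
    if pvIsHeader line || (st.2.2.2 && PySem.Str.isIn ":" line) then
      (st.2.1.insert (pvKeyOf line) line, pvKeyOf line, true)
    else if st.2.2.2 then
      (st.2.1.insert st.2.2.1 (st.2.1.getD st.2.2.1 "" ++ " " ++ PySem.Str.strip line),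
        st.2.2.1, st.2.2.2)
    else st.2
  if pvIsClose line then
    (st.1 ++ [s1.1.items.map (fun p => (p.1, pvValOf p.2))], PySem.Dict.empty, "", false)
  else (st.1, s1)

def parse_avail_pools_py_alt (output : String) : List (List (String × String)) :=
  ((PySem.Str.splitlines output).foldl pvStepB ([], PySem.Dict.empty, "", false)).1

-- ===== PRECONDITION & SPEC =====
def Spec_parse_avail_pools_py (output : String) (out : List (List (String × String))) : Prop := out = parse_avail_pools_py_alt output
instance (output : String) (out : List (List (String × String))) : Decidable (Spec_parse_avail_pools_py output out) := by unfold Spec_parse_avail_pools_py; infer_instance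

-- ===== CLAIM (what is proved, stated in full; the proofs are below) =====
def Claim_equal_parse_avail_pools_py : Prop := ∀ (output : String), Dom_parse_avail_pools_py output → Spec_parse_avail_pools_py output (parse_avail_pools_py output)

-- ===== LEMMAS AND PROOFS =====

-- splitOn with a one-character separator: accumulator laws of its fuelled worker
theorem pv_go_acc (sep : List Char) (fuel : Nat) (l cur : List Char) (acc : List (List Char)) :
    PySem.Chars.splitOn.go sep fuel l cur acc =
      acc.reverse ++ PySem.Chars.splitOn.go sep fuel l cur [] := by
  induction fuel generalizing l cur acc with
  | zero => simp [PySem.Chars.splitOn.go]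
  | succ n ih =>
    cases l with
    | nil => simp [PySem.Chars.splitOn.go]
    | cons c rest =>
      rw [PySem.Chars.splitOn.go, PySem.Chars.splitOn.go]
      split
      · rw [ih, ih (acc := [cur.reverse])]; simp
      · exact ih ..

theorem pv_go_pre (c : Char) (a b cur : List Char) (fuel : Nat) (acc : List (List Char))
    (ha : c ∉ a) (hf : a.length < fuel) :
    PySem.Chars.splitOn.go [c] fuel (a ++ c :: b) cur acc =
      PySem.Chars.splitOn.go [c] (fuel - (a.length + 1)) b [] ((cur.reverse ++ a) :: acc) := by
  induction a generalizing cur fuel with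
  | nil =>
    cases fuel with
    | zero => omega
    | succ n =>
      simp only [List.nil_append]
      rw [PySem.Chars.splitOn.go]
      rw [if_pos (by simp [List.isPrefixOf])]
      simp
  | cons x xs ih =>
    cases fuel with
    | zero => simp at hf
    | succ n =>
      simp only [List.cons_append]
      rw [PySem.Chars.splitOn.go]
      have hx : c ≠ x := fun he => ha (he ▸ List.mem_cons_self ..)
      rw [if_neg (by simp [List.isPrefixOf, hx])]
      rw [ih _ _ (fun hm => ha (List.mem_cons_of_mem _ hm)) (by simpa using hf)]
      have hfe : n - (xs.length + 1) = n + 1 - ((x :: xs).length + 1) := by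
        simp only [List.length_cons]; omega
      rw [hfe]
      simp

-- splitting at the first occurrence of the separator character
theorem pv_splitOn_first (c : Char) (a b : List Char) (ha : c ∉ a) :
    PySem.Chars.splitOn (a ++ c :: b) [c] = a :: PySem.Chars.splitOn b [c] := by
  rw [PySem.Chars.splitOn, pv_go_pre c a b [] _ [] ha (by simp)]
  rw [pv_go_acc]
  have : (a ++ c :: b).length + 1 - (a.length + 1) = b.length + 1 := by
    simp [List.length_append]
  rw [this]
  simp [PySem.Chars.splitOn]

theorem pv_splitColon_toList (s : String) :
    pvSplitColon s = (PySem.Chars.splitOn s.toList [':']).map String.ofList := by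
  simp [pvSplitColon, PySem.Str.split?, PySem.Chars.split?]

theorem pv_isIn_colon_iff_mem (s : String) :
    PySem.Str.isIn ":" s = true ↔ ':' ∈ s.toList := by
  rw [PySem.Str.isIn_iff_infix]
  exact (by simpa using List.singleton_infix_iff ':' s.toList)

theorem pv_colon_decomp (s : String) (h : PySem.Str.isIn ":" s = true) :
    ∃ a b, s.toList = a ++ ':' :: b ∧ ':' ∉ a := by
  have hm : ':' ∈ s.toList := (pv_isIn_colon_iff_mem s).mp h
  refine ⟨s.toList.takeWhile (· ≠ ':'), (s.toList.dropWhile (· ≠ ':')).tail, ?_, ?_⟩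
  · have hd : s.toList.dropWhile (· ≠ ':') ≠ [] := by
      intro he
      have : s.toList.takeWhile (· ≠ ':') = s.toList := by
        have := List.takeWhile_append_dropWhile (p := (· ≠ ':')) (l := s.toList)
        rw [he] at this; simpa using this
      have := List.mem_takeWhile_imp (l := s.toList) (p := (· ≠ ':')) (this ▸ hm)
      simp at this
    have hh : (s.toList.dropWhile (· ≠ ':')).head hd = ':' := by
      have := List.head_dropWhile_not (p := (· ≠ ':')) (l := s.toList) hd
      simpa using this
    have hcons : s.toList.dropWhile (· ≠ ':') = ':' :: (s.toList.dropWhile (· ≠ ':')).tail := by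
      conv_lhs => rw [← List.cons_head_tail hd]
      rw [hh]
    exact (List.takeWhile_append_dropWhile (p := (· ≠ ':')) (l := s.toList)).symm.trans
      (congrArg _ hcons)
  · intro hmem
    have := List.mem_takeWhile_imp hmem
    simp at this

-- appending after the first ':' does not change the parsed key
theorem pv_keyOf_append (s x : String) (hs : PySem.Str.isIn ":" s = true) :
    pvKeyOf (s ++ x) = pvKeyOf s := by
  obtain ⟨a, b, hsl, ha⟩ := pv_colon_decomp s hs
  have h1 : (s ++ x).toList = a ++ ':' :: (b ++ x.toList) := by
    rw [String.toList_append, hsl]; simp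
  rw [pvKeyOf, pvKeyOf, pv_splitColon_toList, pv_splitColon_toList, h1, hsl,
    pv_splitOn_first _ _ _ ha, pv_splitOn_first _ _ _ ha]
  simp [PySem.List.pyGetD_zero_cons]

theorem pv_isIn_colon_append (s x : String) (hs : PySem.Str.isIn ":" s = true) :
    PySem.Str.isIn ":" (s ++ x) = true := by
  rw [pv_isIn_colon_iff_mem] at hs ⊢
  rw [String.toList_append]
  exact List.mem_append_left _ hs

theorem pv_colon_of_sub (sub l : String) (hc : ':' ∈ sub.toList)
    (h : PySem.Str.isIn sub l = true) : PySem.Str.isIn ":" l = true := by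
  rw [pv_isIn_colon_iff_mem]
  exact ((PySem.Str.isIn_iff_infix sub l).mp h).mem hc

theorem pv_header_colon (l : String) (h : pvIsHeader l = true) :
    PySem.Str.isIn ":" l = true := by
  rw [pvIsHeader] at h
  rcases Bool.or_eq_true_iff.mp h with h | h
  · rcases Bool.or_eq_true_iff.mp h with h | h
    · exact pv_colon_of_sub _ _ (by decide) h
    · exact pv_colon_of_sub _ _ (by decide) h
  · exact pv_colon_of_sub _ _ (by decide) h

-- the dict B carries: raw item lines keyed by their parsed key
def pvAbs (segs : List String) : PySem.Dict String String :=
  segs.foldl (fun d s => d.insert (pvKeyOf s) s) PySem.Dict.empty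

theorem pvAbs_concat (segs : List String) (s : String) :
    pvAbs (segs ++ [s]) = (pvAbs segs).insert (pvKeyOf s) s := by
  simp [pvAbs]

-- mapping pvValOf over the values of a dict
def pvMapV (d : PySem.Dict String String) : PySem.Dict String String :=
  PySem.Dict.mk (d.items.map fun p => (p.1, pvValOf p.2))

theorem pv_contains_mapV (d : PySem.Dict String String) (k : String) :
    (pvMapV d).contains k = d.contains k := by
  simp [pvMapV, PySem.Dict.contains, List.any_map, Function.comp_def]

theorem pv_mapV_insert (d : PySem.Dict String String) (k : String) (v : String) :
    pvMapV (d.insert k v) = (pvMapV d).insert k (pvValOf v) := by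
  apply PySem.Dict.ext
  show (d.insert k v).items.map (fun p => (p.1, pvValOf p.2)) =
    ((pvMapV d).insert k (pvValOf v)).items
  rw [PySem.Dict.items_insert, PySem.Dict.items_insert, pv_contains_mapV]
  by_cases hc : d.contains k = true
  · rw [if_pos hc, if_pos hc]
    show _ = List.map _ (List.map _ d.items)
    rw [List.map_map, List.map_map]
    apply List.map_congr_left
    intro p _
    by_cases hk : p.1 = k <;> simp [hk]
  · rw [if_neg hc, if_neg hc]
    simp [pvMapV]

theorem pv_emit_fold (seg : List String) (d : PySem.Dict String String) :
    seg.foldl (fun d s => d.insert (pvKeyOf s) (pvValOf s)) (pvMapV d) =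
      pvMapV (seg.foldl (fun d s => d.insert (pvKeyOf s) s) d) := by
  induction seg generalizing d with
  | nil => rfl
  | cons s t ih =>
    simp only [List.foldl_cons]
    rw [← pv_mapV_insert, ih]

theorem pv_pool_emit (seg : List String) :
    pvPoolDict seg = (pvAbs seg).items.map (fun p => (p.1, pvValOf p.2)) := by
  have h0 : (PySem.Dict.empty : PySem.Dict String String) = pvMapV PySem.Dict.empty := rfl
  rw [pvPoolDict, h0, pv_emit_fold]
  rfl

-- the coupling invariant between A's loop state and B's loop state
def pvInv (stA : List (List String) × List String)
    (stB : List (List (String × String)) × PySem.Dict String String × String × Bool) : Prop :=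
  stB.1 = stA.1.map pvPoolDict ∧
  stB.2.1 = pvAbs stA.2 ∧
  stB.2.2.2 = !stA.2.isEmpty ∧
  (∀ h : stA.2 ≠ [], stB.2.2.1 = pvKeyOf (stA.2.getLast h)) ∧
  (∀ s ∈ stA.2, PySem.Str.isIn ":" s = true)

theorem pv_close_step (D : List (List String)) (S' : List String)
    (P : List (List (String × String))) (cur' : PySem.Dict String String)
    (lk' : String) (act' : Bool) (l : String)
    (h1 : P = D.map pvPoolDict) (m2 : cur' = pvAbs S') (m3 : act' = !S'.isEmpty)
    (m4 : ∀ h : S' ≠ [], lk' = pvKeyOf (S'.getLast h))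
    (m5 : ∀ s ∈ S', PySem.Str.isIn ":" s = true) :
    pvInv (if pvIsClose l then (D ++ [S'], []) else (D, S'))
      (if pvIsClose l then
        (P ++ [cur'.items.map (fun p => (p.1, pvValOf p.2))], PySem.Dict.empty, "", false)
       else (P, cur', lk', act')) := by
  by_cases hc : pvIsClose l = true
  · rw [if_pos hc, if_pos hc]
    refine ⟨?_, rfl, rfl, fun h => absurd rfl h, fun s hs => absurd hs List.not_mem_nil⟩
    show P ++ [cur'.items.map (fun p => (p.1, pvValOf p.2))] = (D ++ [S']).map pvPoolDict
    rw [h1, m2, ← pv_pool_emit, List.map_append, List.map_singleton]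
  · rw [if_neg hc, if_neg hc]
    exact ⟨h1, m2, m3, m4, m5⟩

theorem pv_step_inv (stA : List (List String) × List String)
    (stB : List (List (String × String)) × PySem.Dict String String × String × Bool)
    (l : String) (h : pvInv stA stB) : pvInv (pvStep1 stA l) (pvStepB stB l) := by
  obtain ⟨D, S⟩ := stA
  obtain ⟨P, cur, lk, act⟩ := stB
  obtain ⟨h1, h2, h3, h4, h5⟩ := h
  dsimp only at h1 h2 h3 h4 h5
  rw [pvStep1, pvStepB]
  by_cases hH : pvIsHeader l = true
  · -- header line: both sides record the parsed line
    simp only [hH, Bool.true_or, if_pos trivial]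
    refine pv_close_step D (S ++ [l]) P _ _ _ l h1 ?_ ?_ ?_ ?_
    · rw [h2, pvAbs_concat]
    · simp
    · intro h; simp
    · intro s hs
      rcases List.mem_append.mp hs with hs | hs
      · exact h5 s hs
      · rw [List.mem_singleton.mp hs]; exact pv_header_colon l hH
  · have hH' : pvIsHeader l = false := Bool.not_eq_true _ ▸ (by simpa using hH)
    by_cases hS : S = []
    · -- no active segment: both sides leave their state alone
      subst hS
      have hact : act = false := by rw [h3]; rfl
      simp only [hH', hact, Bool.false_or, Bool.false_and, if_false, ne_eq,
        not_true_eq_false, Bool.false_eq_true]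
      exact pv_close_step D [] P cur lk false l h1 h2 (by simp) h4 h5
    · have hact : act = true := by rw [h3]; simp [hS]
      by_cases hC : PySem.Str.isIn ":" l = true
      · -- ':'-line inside an active segment: recorded like a header line
        simp only [hH', hact, hC, Bool.false_or, Bool.true_and, if_true, ne_eq, hS,
          not_false_iff]
        refine pv_close_step D (S ++ [l]) P _ _ _ l h1 ?_ ?_ ?_ ?_
        · rw [h2, pvAbs_concat]
        · simp
        · intro h; simp
        · intro s hs
          rcases List.mem_append.mp hs with hs | hs
          · exact h5 s hs
          · rw [List.mem_singleton.mp hs]; exact hC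
      · -- continuation line: appended to the last item / to the last key's value
        have hC' : PySem.Str.isIn ":" l = false := Bool.not_eq_true _ ▸ (by simpa using hC)
        simp only [hH', hact, hC', Bool.false_or, Bool.true_and, Bool.false_eq_true,
          if_false, if_true, ne_eq, hS, not_false_iff]
        have hlast : PySem.List.pyGetD S (-1) "" = S.getLast hS :=
          PySem.List.pyGetD_neg_one S "" hS
        have hcolon_last : PySem.Str.isIn ":" (S.getLast hS) = true :=
          h5 _ (List.getLast_mem hS)
        have hdecomp : S.dropLast ++ [S.getLast hS] = S := List.dropLast_concat_getLast hS
        have hkey_sp : pvKeyOf (S.getLast hS ++ " ") = pvKeyOf (S.getLast hS) :=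
          pv_keyOf_append _ _ hcolon_last
        have hcol_sp : PySem.Str.isIn ":" (S.getLast hS ++ " ") = true :=
          pv_isIn_colon_append _ _ hcolon_last
        have hkey : pvKeyOf (S.getLast hS ++ " " ++ PySem.Str.strip l) =
            pvKeyOf (S.getLast hS) := by
          rw [pv_keyOf_append _ _ hcol_sp, hkey_sp]
        have hlk : lk = pvKeyOf (S.getLast hS) := h4 hS
        have hcur : cur = (pvAbs S.dropLast).insert (pvKeyOf (S.getLast hS)) (S.getLast hS) := by
          rw [h2, ← pvAbs_concat, hdecomp]
        refine pv_close_step D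
          (S.dropLast ++ [PySem.List.pyGetD S (-1) "" ++ " " ++ PySem.Str.strip l]) P _ _ _ l
          h1 ?_ ?_ ?_ ?_
        · rw [pvAbs_concat, hlast, hkey, hcur, hlk, PySem.Dict.getD_insert_self,
            PySem.Dict.insert_insert_self]
        · simp
        · intro h
          rw [List.getLast_concat, hlast, hkey, hlk]
        · intro s hs
          rcases List.mem_append.mp hs with hs | hs
          · exact h5 s (List.Sublist.subset (List.dropLast_sublist _) hs)
          · rw [List.mem_singleton.mp hs, hlast]
            exact pv_isIn_colon_append _ _ hcol_sp

theorem pv_fold_inv (lines : List String) (stA : List (List String) × List String)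
    (stB : List (List (String × String)) × PySem.Dict String String × String × Bool)
    (h : pvInv stA stB) : pvInv (lines.foldl pvStep1 stA) (lines.foldl pvStepB stB) := by
  induction lines generalizing stA stB with
  | nil => exact h
  | cons l t ih => exact ih _ _ (pv_step_inv _ _ l h)

-- ===== VERDICT (by name: the statement is the Claim_ definition above) =====
theorem parse_avail_pools_py_spec : Claim_equal_parse_avail_pools_py := by
  intro output _
  have h0 : pvInv ([], []) ([], PySem.Dict.empty, "", false) :=
    ⟨rfl, rfl, rfl, fun h => absurd rfl h, fun s hs => absurd hs (List.not_mem_nil)⟩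
  have hinv := pv_fold_inv (PySem.Str.splitlines output) _ _ h0
  show parse_avail_pools_py output = parse_avail_pools_py_alt output
  rw [parse_avail_pools_py, parse_avail_pools_py_alt, hinv.1]
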